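-- pv_equiv track=rewrite | github.com/RysanekJakub/vrhcaby | src/vrhcaby.py | sektor_spiku_spodni
-- ===== SOURCE A (Python) =====
-- def sektor_spiku_spodni(sektor:int, spikes_lists:list) -> list:
--     # postup pri vykresleni kamenu je trochu komplikovanejsi kvuli tomu, ze se tentokrat musi kameny vypisovat odspoda nahoru
--     # udelal jsem to tak, ze se vezme list kazdeho spiku a podle poctu kamenu (delky seznamu spiku) se zapisou mezery pred kameny
--     # vypada-li seznam spiku takto: [1,1,1]
--     # tak po teto uprave bude vypadat takto: [" "," "," "," ", 1,1,1]
--     nove_listy = []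
--     for sektor_list in spikes_lists[sektor]:    # loop, ktery vytahne seznamy jednotlivych spiku
--         missing = [" " for _ in range(7-len(sektor_list))]  # zde se zapisuji mezery podle poctu kamenu na spiku do noveho seznamu
--         nove_listy.append(missing+sektor_list)  # spojeni seznamu *missing* s mezerami a jiz existujicim seznamem spiku
--
--     # zde uz je postup skoro stejny jako u funkce *sektor_spiku_vrchni*
--     rows = []
--     for i in range(7):
--         row = []
--         for spike in nove_listy:
--             default_mezery = " "*i
--             vypln = " "*(6-i)
--             if spike[i] != " ": # pokud se i nerovna mezere, zapise se kamen
--                 row.append(f"{vypln}/{default_mezery}O{default_mezery}\{vypln}")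
--             else:
--                 row.append(f"{vypln}/{default_mezery} {default_mezery}\{vypln}")
--
--         rows.append(row)
--     return rows
-- ===== SOURCE B (Python) =====
-- def sektor_spiku_spodni(sektor: int, spikes_lists: list) -> list:
--     # Arithmetic form: no padded lists; a spike of n stones shows a stone in
--     # row i (0-based, top of the bottom half) exactly when i + n >= 7.
--     lens = [len(spike) for spike in spikes_lists[sektor]]
--     rows = []
--     for i in range(7):
--         pad = " " * (6 - i)
--         mid = " " * i
--         stone = pad + "/" + mid + "O" + mid + "\\" + pad
--         blank = pad + "/" + mid + " " + mid + "\\" + pad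
--         rows.append([stone if i + n >= 7 else blank for n in lens])
--     return rows
-- ===== Notes on version B (the rewrite author's own statement) =====
-- stated objective: simpler
-- what changed: B drops the padded nove_listy pass entirely: it precomputes the spike lengths once and decides each cell by the arithmetic test i + len(spike) >= 7, building the two possible cell strings once per row instead of per cell.
import Mathlib
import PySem

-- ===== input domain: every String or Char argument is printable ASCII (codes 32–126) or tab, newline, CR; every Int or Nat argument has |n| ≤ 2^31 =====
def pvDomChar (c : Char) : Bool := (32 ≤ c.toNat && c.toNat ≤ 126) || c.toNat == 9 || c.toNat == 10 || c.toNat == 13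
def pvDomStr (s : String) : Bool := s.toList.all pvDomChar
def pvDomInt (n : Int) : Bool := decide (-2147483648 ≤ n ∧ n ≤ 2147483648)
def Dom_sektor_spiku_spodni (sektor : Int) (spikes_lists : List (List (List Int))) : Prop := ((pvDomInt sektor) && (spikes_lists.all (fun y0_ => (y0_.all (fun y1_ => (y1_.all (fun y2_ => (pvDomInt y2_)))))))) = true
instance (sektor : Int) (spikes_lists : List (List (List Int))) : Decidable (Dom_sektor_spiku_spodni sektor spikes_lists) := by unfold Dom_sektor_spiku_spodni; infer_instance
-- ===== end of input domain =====

-- B replaces A's padded intermediate lists by a direct arithmetic row test on the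
-- spike lengths (simpler decomposition; same output).

-- ===== PORT A =====
-- The Python code mixes " " padding with int stones in one list; we model those
-- mixed lists as List (Option Int): none = the " " padding, some x = the stone x.
-- `spike[i]` inside the loop always has 0 ≤ i < 7 ≤ len(spike-padded), so
-- pyGetD with default none is exact there (the default is never consulted).
def sektor_spiku_spodni (sektor : Int) (spikes_lists : List (List (List Int))) : List (List String) :=
  match PySem.List.pyGet? spikes_lists sektor with
  | none => []   -- IndexError in Python; excluded by Pre_
  | some sector =>
    let nove_listy : List (List (Option Int)) :=
      sector.foldl (fun acc sektor_list =>
        acc ++ [List.replicate (7 - sektor_list.length) (none : Option Int)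
                  ++ sektor_list.map some]) []
    (List.range 7).foldl (fun rows i =>
      let row := nove_listy.foldl (fun row spike =>
        let default_mezery := String.ofList (List.replicate i ' ')
        let vypln := String.ofList (List.replicate (6 - i) ' ')
        if PySem.List.pyGetD spike (i : Int) none ≠ none then
          row ++ [vypln ++ "/" ++ default_mezery ++ "O" ++ default_mezery ++ "\\" ++ vypln]
        else
          row ++ [vypln ++ "/" ++ default_mezery ++ " " ++ default_mezery ++ "\\" ++ vypln]) []
      rows ++ [row]) []

-- ===== PORT B =====
def sektor_spiku_spodni_alt (sektor : Int) (spikes_lists : List (List (List Int))) : List (List String) :=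
  match PySem.List.pyGet? spikes_lists sektor with
  | none => []   -- unreachable under Pre_
  | some sector =>
    let lens := sector.map List.length
    (List.range 7).map (fun i =>
      let pad := String.ofList (List.replicate (6 - i) ' ')
      let mid := String.ofList (List.replicate i ' ')
      let stone := pad ++ "/" ++ mid ++ "O" ++ mid ++ "\\" ++ pad
      let blank := pad ++ "/" ++ mid ++ " " ++ mid ++ "\\" ++ pad
      lens.map (fun n => if 7 ≤ i + n then stone else blank))

-- ===== PRECONDITION & SPEC =====
-- Pre_ excludes exactly the inputs where Python A raises IndexError on spikes_lists[sektor].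
def Pre_sektor_spiku_spodni (sektor : Int) (spikes_lists : List (List (List Int))) : Prop :=
  PySem.Raise.InRange spikes_lists.length sektor
instance (sektor : Int) (spikes_lists : List (List (List Int))) : Decidable (Pre_sektor_spiku_spodni sektor spikes_lists) := by unfold Pre_sektor_spiku_spodni; infer_instance
def pvWitness_sektor_spiku_spodni : Int × List (List (List Int)) := (0, [[[1, 1, 1], []]])

def Spec_sektor_spiku_spodni (sektor : Int) (spikes_lists : List (List (List Int))) (out : List (List String)) : Prop := out = sektor_spiku_spodni_alt sektor spikes_lists
instance (sektor : Int) (spikes_lists : List (List (List Int))) (out : List (List String)) : Decidable (Spec_sektor_spiku_spodni sektor spikes_lists out) := by unfold Spec_sektor_spiku_spodni; infer_instance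

-- ===== CLAIM (what is proved, stated in full; the proofs are below) =====
def Claim_equal_sektor_spiku_spodni : Prop := ∀ (sektor : Int) (spikes_lists : List (List (List Int))), Dom_sektor_spiku_spodni sektor spikes_lists → Pre_sektor_spiku_spodni sektor spikes_lists → Spec_sektor_spiku_spodni sektor spikes_lists (sektor_spiku_spodni sektor spikes_lists)

-- ===== LEMMAS AND PROOFS =====

-- A's padded-list cell test agrees with B's arithmetic test for every row 0 ≤ i < 7.
lemma pad_get_ne_none (s : List Int) (i : Nat) (h : i < 7) :
    (List.replicate (7 - s.length) (none : Option Int) ++ s.map some).getD i none ≠ none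
      ↔ 7 ≤ i + s.length := by
  by_cases hc : i < 7 - s.length
  · rw [List.getD_eq_getElem?_getD, List.getElem?_append_left (by simpa using hc)]
    simp [hc]
    omega
  · have hlen : 7 - s.length ≤ i := Nat.le_of_not_lt hc
    have hidx : i - (7 - s.length) < s.length := by omega
    rw [List.getD_eq_getElem?_getD,
        List.getElem?_append_right (by simpa using hlen)]
    simp [List.getElem?_eq_getElem (by simpa using hidx)]
    omega

-- loop shape of A's inner row loop: append one of two cells depending on a test
lemma foldl_append_if_else {a b : Type} (l : List a) (acc : List b)
    (p : a → Prop) [DecidablePred p] (f g : a → b) :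
    l.foldl (fun r x => if p x then r ++ [f x] else r ++ [g x]) acc
      = acc ++ l.map (fun x => if p x then f x else g x) := by
  have hfun : (fun (r : List b) x => if p x then r ++ [f x] else r ++ [g x])
      = fun r x => r ++ [if p x then f x else g x] := by
    funext r x; by_cases h : p x <;> simp [h]
  rw [hfun, PySem.List.foldl_append_singleton_eq_map]

theorem sektor_spiku_spodni_eq (sektor : Int) (spikes_lists : List (List (List Int)))
    (hpre : Pre_sektor_spiku_spodni sektor spikes_lists) :
    sektor_spiku_spodni sektor spikes_lists = sektor_spiku_spodni_alt sektor spikes_lists := by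
  unfold sektor_spiku_spodni sektor_spiku_spodni_alt
  cases hget : PySem.List.pyGet? spikes_lists sektor with
  | none =>
    exact absurd hpre (by simpa [PySem.List.pyGet?_eq_none_iff] using hget)
  | some sector =>
    simp only [PySem.List.foldl_append_singleton_eq_map, foldl_append_if_else,
      List.nil_append, List.map_map]
    apply List.map_congr_left
    intro i hi
    have hi7 : i < 7 := List.mem_range.mp hi
    apply List.map_congr_left
    intro s _
    simp only [Function.comp, PySem.List.pyGetD_natCast]
    rw [if_congr (pad_get_ne_none s i hi7) rfl rfl]

-- ===== VERDICT (by name: the statement is the Claim_ definition above) =====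
theorem sektor_spiku_spodni_spec : Claim_equal_sektor_spiku_spodni := by
  intro sektor spikes_lists _hdom hpre
  unfold Spec_sektor_spiku_spodni
  exact sektor_spiku_spodni_eq sektor spikes_lists hpre
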